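-- pv_equiv track=rewrite | github.com/gwkimgw/CodeTest | NumGame.py | solution
-- ===== SOURCE A (Python) =====
-- def solution(A, B):
--     answer = 0
--     A.sort(), B.sort()
--     for b in B:
--         if b > A[0]:
--             answer += 1
--             del A[0]
--     return answer
-- ===== SOURCE B (Python) =====
-- def solution(A, B):
--     A_sorted = sorted(A)
--     i = 0
--     for b in sorted(B):
--         if i < len(A_sorted) and b > A_sorted[i]:
--             i += 1
--     return i
-- ===== Notes on version B (the rewrite author's own statement) =====
-- stated objective: faster
-- what changed: Replaces A's repeated del A[0] (an O(n) list shift on every match) with an index pointer into a sorted copy of A, so the scan over sorted B is a single O(n) pass after the sorts; B also does not mutate its arguments.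
import Mathlib
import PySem

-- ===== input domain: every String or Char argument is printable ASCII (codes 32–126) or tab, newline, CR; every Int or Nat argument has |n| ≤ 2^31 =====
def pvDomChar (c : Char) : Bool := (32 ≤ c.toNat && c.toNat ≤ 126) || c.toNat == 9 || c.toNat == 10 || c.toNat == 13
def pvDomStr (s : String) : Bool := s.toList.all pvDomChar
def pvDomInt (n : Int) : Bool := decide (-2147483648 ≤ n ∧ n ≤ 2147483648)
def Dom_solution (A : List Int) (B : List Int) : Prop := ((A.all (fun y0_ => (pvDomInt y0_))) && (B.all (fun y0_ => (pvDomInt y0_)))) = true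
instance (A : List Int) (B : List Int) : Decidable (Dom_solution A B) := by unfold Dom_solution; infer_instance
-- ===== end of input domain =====

-- B replaces A's repeated `del A[0]` (a linear shift on every match) with an index pointer
-- into a sorted copy of A (objective: faster). A sorts and pops its argument lists in place;
-- B does not mutate its arguments — the equivalence proved here is about the RETURN value only.

-- ===== PORT A =====
-- one iteration of A's loop body: state = (remaining A, answer)
def stepA (st : List Int × Int) (b : Int) : List Int × Int :=
  match st with
  | (as, ans) =>
    match as with
    | a :: rest => if b > a then (rest, ans + 1) else (a :: rest, ans)
    | [] => ([], ans)   -- Python raises IndexError on A[0] here; Pre_solution excludes exactly such inputs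

def solution (A : List Int) (B : List Int) : Int :=
  let A1 := PySem.List.sorted A (fun x => x) false
  let B1 := PySem.List.sorted B (fun x => x) false
  (B1.foldl stepA (A1, (0 : Int))).2

-- ===== PORT B =====
-- one iteration of B's loop body: state = pointer i into the sorted copy of A
-- (`sA.getD i 0` is exact for `A_sorted[i]` because it is guarded by `i < len`)
def stepB (sA : List Int) (i : Nat) (b : Int) : Nat :=
  if i < sA.length ∧ b > sA.getD i 0 then i + 1 else i

def solution_alt (A : List Int) (B : List Int) : Int :=
  let sA := PySem.List.sorted A (fun x => x) false
  ((PySem.List.sorted B (fun x => x) false).foldl (stepB sA) 0 : Nat)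

-- ===== PRECONDITION & SPEC =====
-- Pre_solution excludes EXACTLY the inputs on which A raises IndexError: A's loop empties its
-- list before reaching the last element of sorted B, which happens precisely when the largest
-- |A| elements among the first |B|-1 elements of sorted B pairwise exceed sorted A.
def Pre_solution (A : List Int) (B : List Int) : Prop :=
  ¬ (B ≠ [] ∧ A.length ≤ B.length - 1 ∧
      ∀ t < A.length,
        (PySem.List.sorted B (fun x => x) false).getD (B.length - 1 - A.length + t) 0 >
        (PySem.List.sorted A (fun x => x) false).getD t 0)
instance (A : List Int) (B : List Int) : Decidable (Pre_solution A B) := by unfold Pre_solution; infer_instance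
def pvWitness_solution : List Int × List Int := ([1, 3], [2])

def Spec_solution (A : List Int) (B : List Int) (out : Int) : Prop := out = solution_alt A B
instance (A : List Int) (B : List Int) (out : Int) : Decidable (Spec_solution A B out) := by unfold Spec_solution; infer_instance

-- ===== CLAIM (what is proved, stated in full; the proofs are below) =====
def Claim_equal_solution : Prop := ∀ (A : List Int) (B : List Int), Dom_solution A B → Pre_solution A B → Spec_solution A B (solution A B)

-- ===== LEMMAS AND PROOFS =====

-- loop invariant: after any prefix of sorted B, A's remaining list is the sorted copy of A with
-- the first i elements dropped, and A's answer differs from B's pointer by the constant c - i.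
-- (When the pointer has reached the end, both loop bodies leave their state unchanged, so the
-- two ports agree on every input; Pre_solution marks where the Python A raises instead.)
theorem fold_agree (sA : List Int) (bs : List Int) :
    ∀ (i : Nat) (c : Int),
      (bs.foldl stepA (sA.drop i, c)).2 = c + ((bs.foldl (stepB sA) i : Nat) : Int) - i := by
  induction bs with
  | nil => intro i c; simp
  | cons b bs ih =>
    intro i c
    by_cases hi : i < sA.length
    · have hdrop : sA.drop i = sA[i] :: sA.drop (i + 1) := List.drop_eq_getElem_cons hi
      have hgetD : sA.getD i 0 = sA[i] := List.getD_eq_getElem sA 0 hi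
      by_cases hb : b > sA[i]
      · have hA : stepA (sA.drop i, c) b = (sA.drop (i + 1), c + 1) := by
          rw [hdrop]; simp [stepA, hb]
        have hB : stepB sA i b = i + 1 := by unfold stepB; rw [hgetD]; simp [hi, hb]
        have := ih (i + 1) (c + 1)
        simp only [List.foldl_cons, hA, hB, this]
        push_cast
        ring
      · have hA : stepA (sA.drop i, c) b = (sA.drop i, c) := by
          rw [hdrop]; simp [stepA, hb]
        have hB : stepB sA i b = i := by unfold stepB; rw [hgetD]; simp [hb]
        simp only [List.foldl_cons, hA, hB, ih i c]
    · have hdrop : sA.drop i = [] := List.drop_eq_nil_of_le (by omega)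
      have hA : stepA (sA.drop i, c) b = (sA.drop i, c) := by rw [hdrop]; simp [stepA]
      have hB : stepB sA i b = i := by unfold stepB; simp [hi]
      simp only [List.foldl_cons, hA, hB, ih i c]

-- ===== VERDICT (by name: the statements are the Claim_ definitions above) =====
theorem solution_spec : Claim_equal_solution := by
  intro A B _ _
  unfold Spec_solution solution solution_alt
  have h := fold_agree (PySem.List.sorted A (fun x => x) false)
      (PySem.List.sorted B (fun x => x) false) 0 0
  simpa using h
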